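-- pv_equiv track=rewrite | github.com/wernerhl/bolivia-satellite-proxy | src/00_fetch/parse_aduana_imports.py | _find_value_col
-- ===== SOURCE A (Python) =====
-- def _find_value_col(columns: list[str], hint: str) -> str | None:
--     for c in columns:
--         cu = str(c).upper()
--         if hint in cu and ("VALOR" in cu or "USD" in cu or "CIF" in cu or "FOB" in cu):
--             return c
--     # Fallback: just the hint
--     for c in columns:
--         if hint in str(c).upper():
--             return c
--     return None
-- ===== SOURCE B (Python) =====
-- def _find_value_col(columns: list[str], hint: str) -> str | None:
--     # Scan back-to-front, keeping the best (rank, column) seen so far;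
--     # rank 0 = hint + value keyword, rank 1 = hint only. Processing earlier
--     # columns later and overriding on rank <= best keeps the leftmost best.
--     best = None
--     for c in reversed(columns):
--         cu = str(c).upper()
--         if hint in cu:
--             rank = 0 if ("VALOR" in cu or "USD" in cu or "CIF" in cu or "FOB" in cu) else 1
--             if best is None or rank <= best[0]:
--                 best = (rank, c)
--     return None if best is None else best[1]
-- ===== Notes on version B (the rewrite author's own statement) =====
-- stated objective: alternative
-- what changed: Replaces A's two sequential forward scans by a single back-to-front scan that maintains the best-ranked candidate (rank 0 = hint+value keyword, rank 1 = hint only) and overrides it on rank <=, so the leftmost best candidate survives.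
import Mathlib
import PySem

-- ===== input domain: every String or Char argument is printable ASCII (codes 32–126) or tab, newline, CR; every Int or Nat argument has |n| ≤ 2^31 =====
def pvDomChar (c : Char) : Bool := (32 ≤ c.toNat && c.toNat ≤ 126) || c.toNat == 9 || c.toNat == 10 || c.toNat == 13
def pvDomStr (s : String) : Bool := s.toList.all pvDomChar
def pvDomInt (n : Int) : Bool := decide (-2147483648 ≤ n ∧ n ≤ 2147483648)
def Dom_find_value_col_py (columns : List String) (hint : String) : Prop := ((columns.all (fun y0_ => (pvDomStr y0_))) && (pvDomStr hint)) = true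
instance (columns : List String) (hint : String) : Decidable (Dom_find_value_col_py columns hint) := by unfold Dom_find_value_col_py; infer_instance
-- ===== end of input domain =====

-- B replaces A's two forward scans by one reversed scan keeping the best-ranked candidate (objective: alternative).

-- ===== PORT A =====
-- first loop of A: first column whose uppercase contains hint AND a value keyword
def aScan1 (hint : String) : List String → Option String
  | [] => none
  | c :: rest =>
    let cu := PySem.Str.upper c
    if PySem.Str.isIn hint cu &&
        (PySem.Str.isIn "VALOR" cu || PySem.Str.isIn "USD" cu ||
         PySem.Str.isIn "CIF" cu || PySem.Str.isIn "FOB" cu)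
    then some c else aScan1 hint rest

-- second (fallback) loop of A: first column whose uppercase contains hint
def aScan2 (hint : String) : List String → Option String
  | [] => none
  | c :: rest =>
    if PySem.Str.isIn hint (PySem.Str.upper c) then some c else aScan2 hint rest

def find_value_col_py (columns : List String) (hint : String) : Option String :=
  match aScan1 hint columns with
  | some c => some c
  | none => aScan2 hint columns

-- ===== PORT B =====
-- B's loop over reversed(columns): structural recursion whose recursive call processes the tail
-- first, so the head is handled last, exactly Python's reversed iteration with the 'best' state.
def bScan (hint : String) : List String → Option (Int × String)
  | [] => none
  | c :: rest =>
    let best := bScan hint rest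
    let cu := PySem.Str.upper c
    if PySem.Str.isIn hint cu then
      let rank : Int :=
        if PySem.Str.isIn "VALOR" cu || PySem.Str.isIn "USD" cu ||
           PySem.Str.isIn "CIF" cu || PySem.Str.isIn "FOB" cu then 0 else 1
      match best with
      | none => some (rank, c)
      | some (r, f) => if rank ≤ r then some (rank, c) else some (r, f)
    else best

def find_value_col_py_alt (columns : List String) (hint : String) : Option String :=
  match bScan hint columns with
  | none => none
  | some (_, c) => some c

-- ===== PRECONDITION & SPEC =====
def Spec_find_value_col_py (columns : List String) (hint : String) (out : Option String) : Prop := out = find_value_col_py_alt columns hint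
instance (columns : List String) (hint : String) (out : Option String) : Decidable (Spec_find_value_col_py columns hint out) := by unfold Spec_find_value_col_py; infer_instance

-- ===== CLAIM (what is proved, stated in full; the proofs are below) =====
def Claim_equal_find_value_col_py : Prop := ∀ (columns : List String) (hint : String), Dom_find_value_col_py columns hint → Spec_find_value_col_py columns hint (find_value_col_py columns hint)

-- ===== LEMMAS AND PROOFS =====
theorem bScan_eq (hint : String) (columns : List String) :
    bScan hint columns =
      match aScan1 hint columns with
      | some c => some (0, c)
      | none =>
        match aScan2 hint columns with
        | some c => some (1, c)
        | none => none := by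
  induction columns with
  | nil => rfl
  | cons c rest ih =>
    by_cases h1 : PySem.Chars.isIn hint.toList (PySem.Chars.upper c.toList) = true
    · by_cases h2 : (((PySem.Chars.isIn ['V','A','L','O','R'] (PySem.Chars.upper c.toList) = true ∨
          PySem.Chars.isIn ['U','S','D'] (PySem.Chars.upper c.toList) = true) ∨
          PySem.Chars.isIn ['C','I','F'] (PySem.Chars.upper c.toList) = true) ∨
          PySem.Chars.isIn ['F','O','B'] (PySem.Chars.upper c.toList) = true)
      · simp [bScan, aScan1, h1, h2, ih]
        cases ha : aScan1 hint rest with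
        | some c' => simp
        | none => cases aScan2 hint rest <;> simp
      · simp [bScan, aScan1, aScan2, h1, h2, ih]
        cases ha : aScan1 hint rest with
        | some c' => simp
        | none => cases aScan2 hint rest <;> simp
    · simp [bScan, aScan1, aScan2, h1, ih]

-- ===== VERDICT (by name: the statement is the Claim_ definition above) =====
theorem find_value_col_py_spec : Claim_equal_find_value_col_py := by
  intro columns hint _
  unfold Spec_find_value_col_py find_value_col_py find_value_col_py_alt
  rw [bScan_eq]
  cases aScan1 hint columns with
  | some c => rfl
  | none => cases aScan2 hint columns <;> rfl
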